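-- pv_equiv track=rewrite | github.com/ohdana/the-big-book-of-small-python-projects | day4_blackjack/blackjack.py | get_possible_aces_sums
-- ===== SOURCE A (Python) =====
-- def get_possible_aces_sums(n_of_aces):
--     possible_sums = []
--     for n in range(n_of_aces + 1):
--         low_ace_value = 1
--         high_ace_value = 11
--
--         possible_aces_sum = low_ace_value * n + high_ace_value * (n_of_aces - n)
--         possible_sums.append(possible_aces_sum)
--         n -= 1
--
--     return possible_sums
-- ===== SOURCE B (Python) =====
-- def get_possible_aces_sums(n_of_aces):
--     return list(range(11 * n_of_aces, n_of_aces - 1, -10))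
-- ===== Notes on version B (the rewrite author's own statement) =====
-- stated objective: idiomatic
-- what changed: Replaces the per-iteration arithmetic loop with a single closed-form descending range (from eleven times the ace count down to the count, stepping by minus ten), built by one range() call; empty for negative counts just like A.
import Mathlib
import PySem

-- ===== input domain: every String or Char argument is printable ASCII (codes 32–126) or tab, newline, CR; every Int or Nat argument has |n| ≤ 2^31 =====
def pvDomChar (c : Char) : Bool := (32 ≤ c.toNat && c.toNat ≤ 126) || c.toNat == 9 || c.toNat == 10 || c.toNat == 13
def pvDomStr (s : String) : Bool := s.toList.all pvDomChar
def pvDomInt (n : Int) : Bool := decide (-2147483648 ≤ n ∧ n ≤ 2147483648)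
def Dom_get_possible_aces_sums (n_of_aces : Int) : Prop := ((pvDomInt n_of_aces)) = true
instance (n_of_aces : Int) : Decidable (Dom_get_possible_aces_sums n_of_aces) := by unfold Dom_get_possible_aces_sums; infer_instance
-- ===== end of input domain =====

-- B replaces A's per-iteration arithmetic loop with one closed-form descending range (idiomatic).

-- ===== PORT A =====
def get_possible_aces_sums (n_of_aces : Int) : List Int :=
  (PySem.List.pyRange 0 (n_of_aces + 1) 1).foldl
    (fun possible_sums n =>
      let low_ace_value : Int := 1
      let high_ace_value : Int := 11
      let possible_aces_sum := low_ace_value * n + high_ace_value * (n_of_aces - n)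
      possible_sums ++ [possible_aces_sum])
    []

-- ===== PORT B =====
def get_possible_aces_sums_alt (n_of_aces : Int) : List Int :=
  PySem.List.pyRange (11 * n_of_aces) (n_of_aces - 1) (-10)

-- ===== PRECONDITION & SPEC =====
def Spec_get_possible_aces_sums (n_of_aces : Int) (out : List Int) : Prop := out = get_possible_aces_sums_alt n_of_aces
instance (n_of_aces : Int) (out : List Int) : Decidable (Spec_get_possible_aces_sums n_of_aces out) := by unfold Spec_get_possible_aces_sums; infer_instance

-- ===== CLAIM (what is proved, stated in full; the proofs are below) =====
def Claim_equal_get_possible_aces_sums : Prop := ∀ (n_of_aces : Int), Dom_get_possible_aces_sums n_of_aces → Spec_get_possible_aces_sums n_of_aces (get_possible_aces_sums n_of_aces)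

-- ===== LEMMAS AND PROOFS =====

/-- Appending singletons in a fold is mapping. -/
theorem pv_foldl_push (f : Int → Int) (l : List Int) (init : List Int) :
    l.foldl (fun acc n => acc ++ [f n]) init = init ++ l.map f := by
  induction l generalizing init with
  | nil => simp
  | cons x xs ih => simp [List.foldl_cons, ih]

theorem pv_A_eq_map (m : Int) :
    get_possible_aces_sums m
      = ((List.range (m + 1 - 0).toNat).map (fun (k : Nat) => (0 : Int) + (k : Int))).map
          (fun n => 1 * n + 11 * (m - n)) := by
  unfold get_possible_aces_sums
  rw [pv_foldl_push (fun n => 1 * n + 11 * (m - n)), PySem.List.pyRange_one, List.nil_append]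

theorem pv_B_eq_map (m : Int) :
    get_possible_aces_sums_alt m
      = (List.range (m + 1).toNat).map (fun (k : Nat) => 11 * m + (-10) * (k : Int)) := by
  unfold get_possible_aces_sums_alt
  unfold PySem.List.pyRange
  have h10 : (-10 : Int) ≠ 0 := by decide
  rw [if_neg h10]
  simp only
  rw [if_neg (by decide : ¬ (0:Int) < -10)]
  by_cases hm : 0 ≤ m
  · rw [if_pos (by omega : m - 1 < 11 * m)]
    have hneg : (- -10 : Int) = 10 := by norm_num
    have hc : ((11 * m - (m - 1) + - -10 - 1) / - -10).toNat = (m + 1).toNat := by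
      rw [hneg]; omega
    rw [hc]
  · rw [if_neg (by omega : ¬ m - 1 < 11 * m)]
    have : (m + 1).toNat = 0 := by omega
    simp [this]

-- ===== VERDICT (by name: the statement is the Claim_ definition above) =====
theorem get_possible_aces_sums_spec : Claim_equal_get_possible_aces_sums := by
  intro m _
  unfold Spec_get_possible_aces_sums
  rw [pv_A_eq_map, pv_B_eq_map, List.map_map]
  have h0 : (m + 1 - 0 : Int) = m + 1 := by ring
  rw [h0]
  apply List.map_congr_left
  intro k _
  simp only [Function.comp]
  ring
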